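-- pv_equiv track=rewrite | github.com/askmadsen/introduction-to-programming | imperative/lists.py | even_after_first_7
-- ===== SOURCE A (Python) =====
-- def even_after_first_7(v: list[int]) -> int:
--     """ Returns the number of even elements after the first 7.
--     >>> even_after_first_7([0,7,3,2,4,5])
--     2
--     """
--     i = 0
--     while i < len(v) and v[i] != 7:
--         i = i + 1
--     count = 0
--     while i < len(v):
--         if v[i] % 2 == 0:
--             count = count + 1
--         i = i + 1
--     return count
-- ===== SOURCE B (Python) =====
-- def even_after_first_7(v: list[int]) -> int:
--     seen = False
--     count = 0
--     for x in v:
--         if seen and x % 2 == 0: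
--             count = count + 1
--         if x == 7:
--             seen = True
--     return count
-- ===== Notes on version B (the rewrite author's own statement) =====
-- stated objective: simpler
-- what changed: Replaces A's two index-based while loops (scan to the first 7, then recount from there) with a single pass over the list threading a seen-7 boolean flag.
import Mathlib
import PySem

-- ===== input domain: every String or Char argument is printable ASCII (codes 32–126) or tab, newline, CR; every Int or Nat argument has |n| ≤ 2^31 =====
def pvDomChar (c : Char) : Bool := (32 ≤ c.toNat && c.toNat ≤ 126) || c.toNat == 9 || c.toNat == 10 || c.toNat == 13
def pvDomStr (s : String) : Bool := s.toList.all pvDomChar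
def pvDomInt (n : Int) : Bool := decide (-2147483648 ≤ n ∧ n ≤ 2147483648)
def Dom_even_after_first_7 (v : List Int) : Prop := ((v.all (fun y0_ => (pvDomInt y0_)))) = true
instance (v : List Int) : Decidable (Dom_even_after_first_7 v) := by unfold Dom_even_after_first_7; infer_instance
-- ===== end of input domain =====

-- B replaces A's two index-based while loops with one pass threading a seen-7 flag; objective: simpler.


-- ===== PORT A =====
-- first while loop: advance i while i < len(v) and v[i] != 7
def pvEvenA_find (v : List Int) (i : Nat) : Nat :=
  if h : i < v.length then
    if v[i] ≠ 7 then pvEvenA_find v (i + 1) else i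
  else i
termination_by v.length - i

-- second while loop: count evens from index i to the end
def pvEvenA_count (v : List Int) (i : Nat) (count : Int) : Int :=
  if h : i < v.length then
    pvEvenA_count v (i + 1) (if PySem.Int.mod v[i] 2 = 0 then count + 1 else count)
  else count
termination_by v.length - i

def even_after_first_7 (v : List Int) : Int :=
  pvEvenA_count v (pvEvenA_find v 0) 0

-- ===== PORT B =====
-- loop body of Source B: update count using the old seen flag, then update the flag
def pvStepB (s : Bool × Int) (x : Int) : Bool × Int :=
  ((s.1 || decide (x = 7)), if s.1 = true ∧ PySem.Int.mod x 2 = 0 then s.2 + 1 else s.2)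

def even_after_first_7_alt (v : List Int) : Int :=
  (v.foldl pvStepB (false, 0)).2

-- ===== PRECONDITION & SPEC =====
def Spec_even_after_first_7 (v : List Int) (out : Int) : Prop := out = even_after_first_7_alt v
instance (v : List Int) (out : Int) : Decidable (Spec_even_after_first_7 v out) := by unfold Spec_even_after_first_7; infer_instance

-- ===== CLAIM (what is proved, stated in full; the proofs are below) =====
def Claim_equal_even_after_first_7 : Prop := ∀ (v : List Int), Dom_even_after_first_7 v → Spec_even_after_first_7 v (even_after_first_7 v)

-- ===== LEMMAS AND PROOFS =====

-- number of even elements of a list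
def pvE : List Int → Int
  | [] => 0
  | x :: xs => (if PySem.Int.mod x 2 = 0 then 1 else 0) + pvE xs

-- number of even elements from the first 7 (inclusive) on
def pvH : List Int → Int
  | [] => 0
  | x :: xs => if x = 7 then pvE (x :: xs) else pvH xs

theorem pvEvenA_count_eq (v : List Int) (i : Nat) (c : Int) :
    pvEvenA_count v i c = c + pvE (v.drop i) := by
  fun_induction pvEvenA_count v i c with
  | case1 i c h ih =>
    simp only [dite_eq_ite] at ih
    rw [ih, List.drop_eq_getElem_cons h, pvE]
    split <;> ring
  | case2 i c h =>
    rw [List.drop_eq_nil_of_le (by omega), pvE]; ring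

theorem pvEvenA_find_eq (v : List Int) (i : Nat) :
    pvE (v.drop (pvEvenA_find v i)) = pvH (v.drop i) := by
  fun_induction pvEvenA_find v i with
  | case1 i h hne ih =>
    rw [ih, List.drop_eq_getElem_cons h, pvH, if_neg hne]
  | case2 i h hne =>
    rw [List.drop_eq_getElem_cons h, pvH, if_pos (by simpa using hne)]
  | case3 i h =>
    rw [List.drop_eq_nil_of_le (by omega)]
    rfl

theorem pvStepB_true (l : List Int) (c : Int) :
    l.foldl pvStepB (true, c) = (true, c + pvE l) := by
  induction l generalizing c with
  | nil => simp [pvE]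
  | cons x xs ih =>
    simp only [List.foldl, pvStepB, pvE, Bool.true_or]
    rw [ih]
    split <;> simp_all <;> ring

theorem pvStepB_false (l : List Int) :
    (l.foldl pvStepB (false, 0)).2 = pvH l := by
  induction l with
  | nil => rfl
  | cons x xs ih =>
    by_cases h7 : x = 7
    · subst h7
      simp only [List.foldl, pvStepB]
      norm_num [pvStepB_true, pvH, pvE, PySem.Int.mod]
      decide
    · simp only [List.foldl, pvStepB, pvH, if_neg h7, decide_eq_false h7, Bool.false_or]
      simpa using ih

-- ===== VERDICT (by name: the statement is the Claim_ definition above) =====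
theorem even_after_first_7_spec : Claim_equal_even_after_first_7 := by
  intro v _
  unfold Spec_even_after_first_7 even_after_first_7 even_after_first_7_alt
  rw [pvEvenA_count_eq, pvEvenA_find_eq, pvStepB_false]
  simp
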